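-- pv_equiv track=rewrite | github.com/HASHIRU-AI/NAAMSE | src/mutation_engine/nodes/mutations/language_games_mutation.py | to_ubbi_dubbi
-- ===== SOURCE A (Python) =====
-- def to_ubbi_dubbi(text: str) -> str:
--     """Convert text to Ubbi Dubbi language."""
--     vowels = "aeiouAEIOU"
--     result = []
--     i = 0
--     while i < len(text):
--         if text[i] in vowels:
--             # Insert "ub" before vowel cluster
--             result.append("ub" if text[i].islower() else "Ub")
--             # Add all consecutive vowels
--             while i < len(text) and text[i] in vowels:
--                 result.append(text[i])
--                 i += 1
--         else:
--             result.append(text[i])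
--             i += 1
--     return "".join(result)
-- ===== SOURCE B (Python) =====
-- import re
--
-- def to_ubbi_dubbi(text: str) -> str:
--     """Convert text to Ubbi Dubbi language."""
--     return re.sub(
--         r'[aeiouAEIOU]+',
--         lambda m: ('ub' if m.group()[0].islower() else 'Ub') + m.group(),
--         text,
--     )
-- ===== Notes on version B (the rewrite author's own statement) =====
-- stated objective: idiomatic
-- what changed: Replaced the manual index loop with a nested while over vowel clusters by a single re.sub on the regex of one-or-more vowels, with a callback that builds the prefix from the case of each maximal vowel run's first character.
import Mathlib
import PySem

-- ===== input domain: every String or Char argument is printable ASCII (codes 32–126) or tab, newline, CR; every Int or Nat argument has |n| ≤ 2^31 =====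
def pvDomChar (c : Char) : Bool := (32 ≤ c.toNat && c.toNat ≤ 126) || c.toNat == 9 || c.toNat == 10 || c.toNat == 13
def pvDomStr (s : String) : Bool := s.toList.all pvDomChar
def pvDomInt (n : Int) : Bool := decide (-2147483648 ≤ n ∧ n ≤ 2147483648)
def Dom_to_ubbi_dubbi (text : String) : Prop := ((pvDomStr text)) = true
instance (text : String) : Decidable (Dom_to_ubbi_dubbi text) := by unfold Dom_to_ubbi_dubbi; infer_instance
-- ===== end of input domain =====

-- B replaces A's manual index loop (nested while over vowel clusters, list of pieces) by a
-- regex substitution over maximal vowel runs; objective: idiomatic (a timing run measured B faster by a constant factor).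

-- ===== PORT A =====
-- `text[i] in vowels`
def pvVowelA (c : Char) : Bool := c ∈ "aeiouAEIOU".toList

-- the inner `while i < len(text) and text[i] in vowels: result.append(text[i]); i += 1`
-- (remaining characters from position i, accumulator `result`) → (result, remaining after the loop)
def pvAddVowels : List Char → List String → List String × List Char
  | [], acc => (acc, [])
  | c :: rest, acc =>
    if pvVowelA c then pvAddVowels rest (acc ++ [String.singleton c])
    else (acc, c :: rest)

theorem pvAddVowels_len : ∀ (cs : List Char) (acc : List String),
    (pvAddVowels cs acc).2.length ≤ cs.length := by
  intro cs
  induction cs with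
  | nil => intro acc; simp [pvAddVowels]
  | cons c rest ih =>
    intro acc
    by_cases h : pvVowelA c = true
    · simp [pvAddVowels, h]
      exact Nat.le_succ_of_le (ih _)
    · simp [pvAddVowels, h]

-- the outer `while i < len(text)` loop of A
def pvLoopA : List Char → List String → List String
  | [], acc => acc
  | c :: rest, acc =>
    if h : pvVowelA c = true then
      let p := pvAddVowels (c :: rest) (acc ++ [if c.isLower then "ub" else "Ub"])
      pvLoopA p.2 p.1
    else pvLoopA rest (acc ++ [String.singleton c])
termination_by cs _ => cs.length
decreasing_by
  · show (pvAddVowels (c :: rest) _).2.length < (c :: rest).length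
    simp [pvAddVowels, h]
    exact pvAddVowels_len _ _
  · simp

def to_ubbi_dubbi (text : String) : String := String.join (pvLoopA text.toList [])

-- ===== PORT B =====
-- the regex character class [aeiouAEIOU]
def pvVowelB (c : Char) : Bool := c ∈ ['a','e','i','o','u','A','E','I','O','U']

-- re.sub(r'[aeiouAEIOU]+', repl, text): scan, replacing each maximal vowel run
def pvSubB : List Char → String
  | [] => ""
  | c :: rest =>
    if h : pvVowelB c = true then
      -- a match: the maximal vowel run starting here; repl prefixes 'ub'/'Ub' by the first vowel's case
      ((if c.isLower then "ub" else "Ub") ++ String.ofList ((c :: rest).takeWhile pvVowelB))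
        ++ pvSubB ((c :: rest).dropWhile pvVowelB)
    else String.singleton c ++ pvSubB rest
termination_by cs => cs.length
decreasing_by
  · simp [h]
    exact List.length_dropWhile_le _ _
  · simp

def to_ubbi_dubbi_alt (text : String) : String := pvSubB text.toList

-- ===== PRECONDITION & SPEC =====
def Spec_to_ubbi_dubbi (text : String) (out : String) : Prop := out = to_ubbi_dubbi_alt text
instance (text : String) (out : String) : Decidable (Spec_to_ubbi_dubbi text out) := by unfold Spec_to_ubbi_dubbi; infer_instance

-- ===== CLAIM (what is proved, stated in full; the proofs are below) =====
def Claim_equal_to_ubbi_dubbi : Prop := ∀ (text : String), Dom_to_ubbi_dubbi text → Spec_to_ubbi_dubbi text (to_ubbi_dubbi text)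

-- ===== LEMMAS AND PROOFS =====
theorem pvVowel_eq : pvVowelA = pvVowelB := by
  funext c; simp [pvVowelA, pvVowelB]

theorem pvAddVowels_spec : ∀ (cs : List Char) (acc : List String),
    pvAddVowels cs acc =
      (acc ++ (cs.takeWhile pvVowelA).map String.singleton, cs.dropWhile pvVowelA) := by
  intro cs
  induction cs with
  | nil => intro acc; simp [pvAddVowels]
  | cons c rest ih =>
    intro acc
    by_cases h : pvVowelA c = true
    · simp [pvAddVowels, h, ih]
    · simp [pvAddVowels, h]

theorem pvFoldl_append (s : String) (l : List String) :
    List.foldl (· ++ ·) s l = s ++ List.foldl (· ++ ·) "" l := by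
  induction l generalizing s with
  | nil => simp
  | cons t l ih =>
    simp only [List.foldl_cons]
    rw [ih (s ++ t), ih ("" ++ t), String.append_assoc]
    simp

theorem pvJoin_cons (s : String) (l : List String) :
    String.join (s :: l) = s ++ String.join l := by
  simp only [String.join, List.foldl_cons]
  rw [pvFoldl_append]
  simp

theorem pvJoin_append (l₁ l₂ : List String) :
    String.join (l₁ ++ l₂) = String.join l₁ ++ String.join l₂ := by
  induction l₁ with
  | nil => simp [String.join]
  | cons s l ih => rw [List.cons_append, pvJoin_cons, pvJoin_cons, ih, String.append_assoc]

theorem pvJoin_singletons (cs : List Char) :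
    String.join (cs.map String.singleton) = String.ofList cs := by
  induction cs with
  | nil => rfl
  | cons c rest ih =>
    rw [List.map_cons, pvJoin_cons, ih]
    apply String.ext
    simp [String.singleton]

theorem pvLoopA_join : ∀ (n : ℕ) (cs : List Char) (acc : List String),
    cs.length ≤ n →
    String.join (pvLoopA cs acc) = String.join acc ++ pvSubB cs := by
  intro n
  induction n with
  | zero =>
    intro cs acc hle
    have : cs = [] := List.eq_nil_of_length_eq_zero (Nat.le_zero.mp hle)
    subst this
    simp [pvLoopA, pvSubB]
  | succ n ih =>
    intro cs acc hle
    match cs with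
    | [] => simp [pvLoopA, pvSubB]
    | c :: rest =>
      by_cases h : pvVowelA c = true
      · have hb : pvVowelB c = true := by rw [← pvVowel_eq]; exact h
        rw [pvLoopA, dif_pos h, pvAddVowels_spec]
        have hdw : List.dropWhile pvVowelA (c :: rest) = List.dropWhile pvVowelA rest := by
          simp [List.dropWhile_cons, h]
        have hlen : (List.dropWhile pvVowelA (c :: rest)).length ≤ n := by
          rw [hdw]
          have h1 := List.length_dropWhile_le pvVowelA rest
          simp only [List.length_cons] at hle
          omega
        rw [ih _ _ hlen]
        rw [pvSubB, dif_pos hb, ← pvVowel_eq]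
        rw [pvJoin_append, pvJoin_append, pvJoin_singletons]
        simp [String.append_assoc, String.join]
      · have hb : ¬ pvVowelB c = true := by rw [← pvVowel_eq]; exact h
        rw [pvLoopA, dif_neg h]
        have hlen : rest.length ≤ n := by simp only [List.length_cons] at hle; omega
        rw [ih _ _ hlen]
        rw [pvSubB, dif_neg hb]
        rw [pvJoin_append, String.append_assoc]
        simp [String.join, String.singleton]

-- ===== VERDICT (by name: the statement is the Claim_ definition above) =====
theorem to_ubbi_dubbi_spec : Claim_equal_to_ubbi_dubbi := by
  intro text _
  unfold Spec_to_ubbi_dubbi to_ubbi_dubbi to_ubbi_dubbi_alt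
  have := pvLoopA_join text.toList.length text.toList [] (le_refl _)
  simpa [String.join] using this
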